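-- pv_equiv track=rewrite | github.com/MrBrantCode/unitest_baseline | mut_generate/mist_train_cf/cf_58010/solution.py | calculate_disparity
-- ===== SOURCE A (Python) =====
-- def calculate_disparity(arrays):
--     result = []
--     for array in arrays:
--         if len(array) == 0:
--             result.append((0, None, None, None))
--             continue
--
--         min_val = min(array)
--         max_val = max(array)
--
--         min_index = array.index(min_val)
--         max_index = array.index(max_val)
--
--         mean = round((max_val + min_val) / 2)
--         disparity = max_val - min_val
--
--         result.append((disparity, max_index, min_index, mean))
--
--     return result
-- ===== SOURCE B (Python) =====
-- def calculate_disparity(arrays):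
--     result = []
--     for array in arrays:
--         if not array:
--             result.append((0, None, None, None))
--             continue
--         min_val = max_val = array[0]
--         min_idx = max_idx = 0
--         i = 1
--         for v in array[1:]:
--             if v < min_val:
--                 min_val, min_idx = v, i
--             if v > max_val:
--                 max_val, max_idx = v, i
--             i += 1
--         result.append((max_val - min_val, max_idx, min_idx,
--                        round((min_val + max_val) / 2)))
--     return result
-- ===== Notes on version B (the rewrite author's own statement) =====
-- stated objective: simpler
-- what changed: Replaces the four separate passes over each array (min, max, index(min), index(max)) by one loop that maintains the running min/max together with their first-occurrence indices.
import Mathlib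
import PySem

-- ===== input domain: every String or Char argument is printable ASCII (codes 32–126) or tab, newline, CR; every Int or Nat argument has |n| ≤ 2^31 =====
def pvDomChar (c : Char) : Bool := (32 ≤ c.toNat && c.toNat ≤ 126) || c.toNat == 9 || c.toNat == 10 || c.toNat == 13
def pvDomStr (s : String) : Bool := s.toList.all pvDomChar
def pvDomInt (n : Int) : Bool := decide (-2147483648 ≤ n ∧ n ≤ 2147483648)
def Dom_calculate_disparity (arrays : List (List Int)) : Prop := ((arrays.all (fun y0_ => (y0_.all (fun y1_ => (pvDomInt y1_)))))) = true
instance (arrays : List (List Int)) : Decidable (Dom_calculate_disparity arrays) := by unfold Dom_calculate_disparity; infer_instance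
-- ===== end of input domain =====

-- B changes the decomposition only: one combined scan per array instead of A's four separate passes (same O(n) cost, plainer).

-- shared helper: Python's round((max+min)/2) on integer max+min = s; exact on |values| ≤ 2^31
-- (s/2 is exactly .0 or .5 in a double there, and round uses banker's rounding on .5)
def pyRoundHalf (s : Int) : Int :=
  let k := PySem.Int.floordiv s 2
  if PySem.Int.mod s 2 = 0 then k
  else if PySem.Int.mod k 2 = 0 then k else k + 1

-- ===== PORT A =====
def calculate_disparity (arrays : List (List Int)) : List (Int × Option Int × Option Int × Option Int) :=
  arrays.map (fun array =>
    if array.length = 0 then (0, none, none, none)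
    else
      match PySem.List.min? array (fun x => x), PySem.List.max? array (fun x => x) with
      | some min_val, some max_val =>
          (max_val - min_val,
           (PySem.List.index? array max_val).map (fun k => (k : Int)),
           (PySem.List.index? array min_val).map (fun k => (k : Int)),
           some (pyRoundHalf (max_val + min_val)))
      | _, _ => (0, none, none, none))   -- unreachable: array is nonempty here

-- ===== PORT B =====
-- the single pass of Source B: state (min_val, max_val, min_idx, max_idx), i is the current index
def pvScan : List Int → Int → Int → Int → Int → Int → (Int × Int × Int × Int)
  | [], mn, mx, mi, xi, _ => (mn, mx, mi, xi)
  | v :: rest, mn, mx, mi, xi, i =>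
      let (mn', mi') := if v < mn then (v, i) else (mn, mi)
      let (mx', xi') := if v > mx then (v, i) else (mx, xi)
      pvScan rest mn' mx' mi' xi' (i + 1)

def calculate_disparity_alt (arrays : List (List Int)) : List (Int × Option Int × Option Int × Option Int) :=
  arrays.map (fun array =>
    match array with
    | [] => (0, none, none, none)
    | x :: rest =>
        let (min_val, max_val, min_idx, max_idx) := pvScan rest x x 0 0 1
        (max_val - min_val, some max_idx, some min_idx,
         some (pyRoundHalf (min_val + max_val))))

-- ===== PRECONDITION & SPEC =====
def Spec_calculate_disparity (arrays : List (List Int)) (out : List (Int × Option Int × Option Int × Option Int)) : Prop := out = calculate_disparity_alt arrays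
instance (arrays : List (List Int)) (out : List (Int × Option Int × Option Int × Option Int)) : Decidable (Spec_calculate_disparity arrays out) := by unfold Spec_calculate_disparity; infer_instance

-- ===== CLAIM (what is proved, stated in full; the proofs are below) =====
def Claim_equal_calculate_disparity : Prop := ∀ (arrays : List (List Int)), Dom_calculate_disparity arrays → Spec_calculate_disparity arrays (calculate_disparity arrays)

-- ===== LEMMAS AND PROOFS =====

-- running min/max of x :: p, as A's min?/max? compute them (min?_id_cons / max?_id_cons)
def pvAmin (x : Int) (p : List Int) : Int := p.foldl min x
def pvAmax (x : Int) (p : List Int) : Int := p.foldl max x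
-- first index of the min/max in x :: p, as an Int (always found, so getD never fires)
def pvIMin (x : Int) (p : List Int) : Int := ((PySem.List.index? (x :: p) (pvAmin x p)).getD 0 : Nat)
def pvIMax (x : Int) (p : List Int) : Int := ((PySem.List.index? (x :: p) (pvAmax x p)).getD 0 : Nat)

theorem pvAmin_mem (x : Int) (p : List Int) : pvAmin x p ∈ x :: p := by
  have h := PySem.List.min?_mem (xs := x :: p) (key := fun y => y) (m := pvAmin x p)
  exact h (by simpa [pvAmin] using PySem.List.min?_id_cons (x := x) (t := p))

theorem pvAmax_mem (x : Int) (p : List Int) : pvAmax x p ∈ x :: p := by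
  have h := PySem.List.max?_mem (xs := x :: p) (key := fun y => y) (m := pvAmax x p)
  exact h (by simpa [pvAmax] using PySem.List.max?_id_cons (x := x) (t := p))

theorem pvAmin_isMin (x : Int) (p : List Int) : ∀ y ∈ x :: p, pvAmin x p ≤ y := by
  have h := PySem.List.min?_isMin (xs := x :: p) (key := fun y => y) (m := pvAmin x p)
    (by simpa [pvAmin] using PySem.List.min?_id_cons (x := x) (t := p))
  simpa using h

theorem pvAmax_isMax (x : Int) (p : List Int) : ∀ y ∈ x :: p, y ≤ pvAmax x p := by
  have h := PySem.List.max?_isMax (xs := x :: p) (key := fun y => y) (m := pvAmax x p)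
    (by simpa [pvAmax] using PySem.List.max?_id_cons (x := x) (t := p))
  simpa using h

theorem pvAmin_append_one (x v : Int) (p : List Int) :
    pvAmin x (p ++ [v]) = if v < pvAmin x p then v else pvAmin x p := by
  simp only [pvAmin, List.foldl_append, List.foldl_cons, List.foldl_nil]
  rcases lt_or_ge v (p.foldl min x) with h | h
  · simp [le_of_lt h, if_pos h]
  · simp [h, not_lt.mpr h]

theorem pvAmax_append_one (x v : Int) (p : List Int) :
    pvAmax x (p ++ [v]) = if v > pvAmax x p then v else pvAmax x p := by
  simp only [pvAmax, List.foldl_append, List.foldl_cons, List.foldl_nil]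
  rcases lt_or_ge (p.foldl max x) v with h | h
  · simp [le_of_lt h, if_pos h]
  · simp [max_def, not_lt.mpr h]
    omega

theorem pvIMin_append_one (x v : Int) (p : List Int) :
    pvIMin x (p ++ [v]) = if v < pvAmin x p then (1 + p.length : Int) else pvIMin x p := by
  by_cases h : v < pvAmin x p
  · have hnotmem : v ∉ x :: p := fun hm => absurd (pvAmin_isMin x p v hm) (not_le.mpr h)
    have : pvAmin x (p ++ [v]) = v := by rw [pvAmin_append_one]; simp [h]
    simp only [pvIMin, if_pos h, this, ← List.cons_append]
    rw [PySem.List.index?_append_singleton_self (x :: p) v hnotmem]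
    simp; omega
  · have : pvAmin x (p ++ [v]) = pvAmin x p := by rw [pvAmin_append_one]; simp [h]
    simp only [pvIMin, if_neg h, this, ← List.cons_append]
    rw [PySem.List.index?_append_of_mem _ (pvAmin_mem x p)]

theorem pvIMax_append_one (x v : Int) (p : List Int) :
    pvIMax x (p ++ [v]) = if v > pvAmax x p then (1 + p.length : Int) else pvIMax x p := by
  by_cases h : v > pvAmax x p
  · have hnotmem : v ∉ x :: p := fun hm => absurd (pvAmax_isMax x p v hm) (not_le.mpr h)
    have : pvAmax x (p ++ [v]) = v := by rw [pvAmax_append_one]; simp [h]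
    simp only [pvIMax, if_pos h, this, ← List.cons_append]
    rw [PySem.List.index?_append_singleton_self (x :: p) v hnotmem]
    simp; omega
  · have : pvAmax x (p ++ [v]) = pvAmax x p := by rw [pvAmax_append_one]; simp [h]
    simp only [pvIMax, if_neg h, this, ← List.cons_append]
    rw [PySem.List.index?_append_of_mem _ (pvAmax_mem x p)]

-- the invariant: scanning rest from the state describing x :: p yields the state of x :: (p ++ rest)
theorem pvScan_spec (rest : List Int) : ∀ (p : List Int) (x : Int),
    pvScan rest (pvAmin x p) (pvAmax x p) (pvIMin x p) (pvIMax x p) (1 + p.length)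
      = (pvAmin x (p ++ rest), pvAmax x (p ++ rest), pvIMin x (p ++ rest), pvIMax x (p ++ rest)) := by
  induction rest with
  | nil => intro p x; simp [pvScan]
  | cons v r ih =>
      intro p x
      have key := ih (p ++ [v]) x
      simp only [pvScan]
      rw [show (p ++ [v]) ++ r = p ++ v :: r from by simp] at key
      rw [show (1 + ((p ++ [v]).length : Int)) = (1 + (p.length : Int)) + 1 from by simp; omega] at key
      rw [← key, pvAmin_append_one, pvAmax_append_one, pvIMin_append_one, pvIMax_append_one]
      by_cases h1 : v < pvAmin x p <;> by_cases h2 : v > pvAmax x p <;>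
        simp [h1, h2]

theorem pvStep_eq (a : List Int) :
    (if a.length = 0 then ((0 : Int), (none : Option Int), (none : Option Int), (none : Option Int))
     else
       match PySem.List.min? a (fun x => x), PySem.List.max? a (fun x => x) with
       | some min_val, some max_val =>
           (max_val - min_val,
            (PySem.List.index? a max_val).map (fun k => (k : Int)),
            (PySem.List.index? a min_val).map (fun k => (k : Int)),
            some (pyRoundHalf (max_val + min_val)))
       | _, _ => (0, none, none, none))
    = (match a with
       | [] => ((0 : Int), (none : Option Int), (none : Option Int), (none : Option Int))
       | x :: rest =>
           let (min_val, max_val, min_idx, max_idx) := pvScan rest x x 0 0 1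
           (max_val - min_val, some max_idx, some min_idx,
            some (pyRoundHalf (min_val + max_val)))) := by
  cases a with
  | nil => simp
  | cons x rest =>
      have hscan := pvScan_spec rest [] x
      have h0 : pvAmin x [] = x := rfl
      have h1 : pvAmax x [] = x := rfl
      have h2 : pvIMin x [] = 0 := by simp [pvIMin, pvAmin]
      have h3 : pvIMax x [] = 0 := by simp [pvIMax, pvAmax]
      rw [h0, h1, h2, h3] at hscan
      simp only [List.nil_append, List.length_nil] at hscan
      simp only [List.length_cons, Nat.succ_ne_zero, if_false]
      rw [PySem.List.min?_id_cons, PySem.List.max?_id_cons]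
      rw [show pvScan rest x x 0 0 1 = pvScan rest x x 0 0 (1 + ((0:Nat):Int)) from by norm_num, hscan]
      have hminmem := pvAmin_mem x rest
      have hmaxmem := pvAmax_mem x rest
      obtain ⟨kn, hkn⟩ := Option.isSome_iff_exists.mp ((PySem.List.index?_isSome_iff (x :: rest) (pvAmin x rest)).mpr hminmem)
      obtain ⟨kx, hkx⟩ := Option.isSome_iff_exists.mp ((PySem.List.index?_isSome_iff (x :: rest) (pvAmax x rest)).mpr hmaxmem)
      rw [PySem.List.index?_eq_idxOf?] at hkn hkx
      have hin : pvIMin x rest = (kn : Int) := by simp [pvIMin, hkn]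
      have hix : pvIMax x rest = (kx : Int) := by simp [pvIMax, hkx]
      simp only [pvAmin, pvAmax] at hkn hkx
      simp [hkn, hkx, hin, hix, pvAmin, pvAmax, Int.add_comm]

theorem calculate_disparity_spec : Claim_equal_calculate_disparity := by
  intro arrays _
  unfold Spec_calculate_disparity calculate_disparity calculate_disparity_alt
  exact List.map_congr_left (fun a _ => pvStep_eq a)
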